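-- pv_equiv track=rewrite | github.com/MLBP04/Cryptographic-Application-FP | streamlit_app.py | xor_block_decrypt
-- ===== SOURCE A (Python) =====
-- def remove_padding(message, padding_char='_'):
--     return message.rstrip(padding_char)
--
-- def xor_block_decrypt(hex_text, key):
--     try:
--         hex_values = [int(h, 16) for h in hex_text.split()]
--     except ValueError:
--         return "Error: Invalid hex input for decryption"
--     result = []
--     for i in range(0, len(hex_values), 8):
--         block = hex_values[i:i+8]
--         decrypted_block = ''.join(chr(b ^ ord(k)) for b, k in zip(block, key))
--         result.append(decrypted_block)
--     return remove_padding(''.join(result))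
-- ===== SOURCE B (Python) =====
-- def remove_padding(message, padding_char='_'):
--     return message.rstrip(padding_char)
--
-- def xor_block_decrypt(hex_text, key):
--     try:
--         hex_values = [int(h, 16) for h in hex_text.split()]
--     except ValueError:
--         return "Error: Invalid hex input for decryption"
--     chars = [chr(b ^ ord(key[i % 8]))
--              for i, b in enumerate(hex_values) if i % 8 < len(key)]
--     return remove_padding(''.join(chars))
-- ===== Notes on version B (the rewrite author's own statement) =====
-- stated objective: simpler
-- what changed: Replaces the explicit block loop (slice into 8-value blocks, zip each block with the key, join block strings) by one flat comprehension over enumerate(hex_values) that keys each value by its index mod 8, guarded by i % 8 < len(key).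
import Mathlib
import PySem

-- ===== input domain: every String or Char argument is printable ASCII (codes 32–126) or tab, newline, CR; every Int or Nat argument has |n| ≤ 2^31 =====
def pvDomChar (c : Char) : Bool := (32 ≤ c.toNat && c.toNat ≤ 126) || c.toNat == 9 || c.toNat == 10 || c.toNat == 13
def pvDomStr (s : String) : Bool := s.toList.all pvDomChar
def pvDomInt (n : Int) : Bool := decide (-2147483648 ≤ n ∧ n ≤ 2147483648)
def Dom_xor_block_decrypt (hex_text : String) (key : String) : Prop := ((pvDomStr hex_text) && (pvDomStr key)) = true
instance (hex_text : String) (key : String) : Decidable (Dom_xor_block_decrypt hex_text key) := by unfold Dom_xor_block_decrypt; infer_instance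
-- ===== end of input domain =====

-- B replaces A's explicit 8-value block loop (slice, zip with key, join block strings) by one flat
-- comprehension over enumerate(hex_values) keyed by index mod 8; same result, simpler decomposition.

-- ===== PORT A =====
-- chr(b ^ ord(k)); exact under Pre_ (parsed values are valid non-surrogate code points there)
def pvXorChr (b : Int) (k : Char) : Char := Char.ofNat (PySem.Int.bxor b (k.toNat : Int)).toNat

-- message.rstrip('_'): drop trailing '_' characters (hand port, exact)
def remove_padding (message : String) : String :=
  String.ofList ((message.toList.reverse.dropWhile (· == '_')).reverse)

def xor_block_decrypt (hex_text : String) (key : String) : String :=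
  match (PySem.Str.split₀ hex_text).mapM (fun h => PySem.Int.ofStrBase? h 16) with
  | none => "Error: Invalid hex input for decryption"
  | some hex_values =>
    let result : List String :=
      (PySem.List.pyRange 0 (hex_values.length : Int) 8).foldl (fun acc i =>
        let block := PySem.List.slice hex_values (some i) (some (i + 8))
        let decrypted_block :=
          String.ofList ((block.zip key.toList).map (fun bk => pvXorChr bk.1 bk.2))
        acc ++ [decrypted_block]) []
    remove_padding (PySem.Str.join "" result)

-- ===== PORT B =====
def xor_block_decrypt_alt (hex_text : String) (key : String) : String :=
  match (PySem.Str.split₀ hex_text).mapM (fun h => PySem.Int.ofStrBase? h 16) with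
  | none => "Error: Invalid hex input for decryption"
  | some hex_values =>
    let chars : List Char :=
      ((PySem.List.enumerate hex_values).filter
          (fun ib => PySem.Int.mod ib.1 8 < (key.length : Int))).map
        (fun ib => pvXorChr ib.2 (key.toList.getD (PySem.Int.mod ib.1 8).toNat ' '))
    remove_padding (String.ofList chars)

-- ===== PRECONDITION & SPEC =====
-- Pre_ excludes inputs where some parsed hex value at a key-covered position (index i with
-- i % 8 < len(key)) is negative or above 0x10FFFF — there Python's chr raises ValueError outside
-- the try, so A raises — or is a surrogate code point (0xD800–0xDFFF): there A returns a Python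
-- str that is not a representable Lean String (Lean Char excludes surrogates), so the value
-- leaves the declared type; B behaves identically in Python on those surrogate inputs.
-- (The proved equality of the two ports happens to hold on all inputs; Pre_ only marks where
-- the ports are faithful to the Pythons.)
def Pre_xor_block_decrypt (hex_text : String) (key : String) : Prop :=
  match (PySem.Str.split₀ hex_text).mapM (fun h => PySem.Int.ofStrBase? h 16) with
  | none => True
  | some hex_values =>
    ∀ ib ∈ PySem.List.enumerate hex_values, PySem.Int.mod ib.1 8 < (key.length : Int) →
      0 ≤ ib.2 ∧ ib.2 ≤ 0x10FFFF ∧ ¬(0xD800 ≤ ib.2 ∧ ib.2 ≤ 0xDFFF)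
instance (hex_text : String) (key : String) : Decidable (Pre_xor_block_decrypt hex_text key) := by
  unfold Pre_xor_block_decrypt; exact match h : (PySem.Str.split₀ hex_text).mapM (fun h => PySem.Int.ofStrBase? h 16) with
  | none => by infer_instance
  | some _ => by infer_instance

def pvWitness_xor_block_decrypt : String × String := ("48 65 09 2c 2c", "  Hello")

def Spec_xor_block_decrypt (hex_text : String) (key : String) (out : String) : Prop := out = xor_block_decrypt_alt hex_text key
instance (hex_text : String) (key : String) (out : String) : Decidable (Spec_xor_block_decrypt hex_text key out) := by unfold Spec_xor_block_decrypt; infer_instance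

-- ===== CLAIM (what is proved, stated in full; the proofs are below) =====
def Claim_equal_xor_block_decrypt : Prop := ∀ (hex_text : String) (key : String), Dom_xor_block_decrypt hex_text key → Pre_xor_block_decrypt hex_text key → Spec_xor_block_decrypt hex_text key (xor_block_decrypt hex_text key)

-- ===== LEMMAS AND PROOFS =====

-- one 8-value block: (block.zip key).map chr-xor
def pvChunk (kcs : List Char) (bl : List Int) : List Char :=
  (bl.zip kcs).map (fun bk => pvXorChr bk.1 bk.2)

-- reference decomposition both ports are reduced to: recursion in chunks of 8
def pvChunkRec (kcs : List Char) : List Int → List Char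
  | [] => []
  | x :: xs =>
    pvChunk kcs ((x :: xs).take 8) ++ pvChunkRec kcs ((x :: xs).drop 8)
  termination_by hv => hv.length
  decreasing_by simp

lemma pyRange_step8_nil (a b : Int) (h : b ≤ a) : PySem.List.pyRange a b 8 = [] := by
  rw [PySem.List.pyRange_of_pos a b (by norm_num)]
  simp [show ¬ a < b by omega]

lemma pyRange_step8_cons (a b : Int) (h : a < b) :
    PySem.List.pyRange a b 8 = a :: PySem.List.pyRange (a + 8) b 8 := by
  rw [PySem.List.pyRange_of_pos a b (by norm_num),
      PySem.List.pyRange_of_pos (a + 8) b (by norm_num)]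
  have hc : (if a < b then ((b - a + 8 - 1) / 8).toNat else 0)
      = (if a + 8 < b then ((b - (a + 8) + 8 - 1) / 8).toNat else 0) + 1 := by
    split_ifs <;> omega
  rw [hc, List.range_succ_eq_map]
  simp only [List.map_cons, List.map_map]
  refine List.cons_eq_cons.mpr ⟨by simp, ?_⟩
  apply List.map_congr_left
  intro k _
  simp [Function.comp, Nat.succ_eq_add_one]
  ring

lemma pyRange_step8_shift (a b : Int) :
    PySem.List.pyRange (a + 8) b 8 = (PySem.List.pyRange a (b - 8) 8).map (· + 8) := by
  rw [PySem.List.pyRange_of_pos (a + 8) b (by norm_num),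
      PySem.List.pyRange_of_pos a (b - 8) (by norm_num)]
  have hc : (if a + 8 < b then ((b - (a + 8) + 8 - 1) / 8).toNat else 0)
      = (if a < b - 8 then ((b - 8 - a + 8 - 1) / 8).toNat else 0) := by
    split_ifs <;> omega
  rw [hc, List.map_map]
  apply List.map_congr_left
  intro k _
  simp [Function.comp]; ring

lemma chars_join_nil (l : List (List Char)) : PySem.Chars.join [] l = l.flatten := by
  show List.intercalate [] l = l.flatten
  induction l with
  | nil => simp [List.intercalate]
  | cons a t ih =>
    cases t with
    | nil => simp [List.intercalate]
    | cons b r =>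
      simp only [List.intercalate, List.intersperse] at *
      simp [ih]

lemma pv_flatMap_single {α β : Type} (g : α → β) (l : List α) :
    l.flatMap (fun i => [g i]) = l.map g := by
  induction l <;> simp_all

-- A-side chars = pvChunkRec
lemma A_chunks (kcs : List Char) (hv : List Int) :
    ((PySem.List.pyRange 0 (hv.length : Int) 8).map
        (fun i => ((PySem.List.slice hv (some i) (some (i + 8))).zip kcs).map
                  (fun bk => pvXorChr bk.1 bk.2))).flatten = pvChunkRec kcs hv := by
  induction hv using pvChunkRec.induct with
  | case1 => simp [pyRange_step8_nil 0 0 le_rfl, pvChunkRec]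
  | case2 x xs ih =>
    have hn : (0 : Int) < ((x :: xs).length : Int) := by
      have : 0 < (x :: xs).length := by simp
      exact_mod_cast this
    rw [pyRange_step8_cons 0 _ hn, List.map_cons, List.flatten_cons]
    have hshift := pyRange_step8_shift 0 ((x :: xs).length : Int)
    rw [hshift, List.map_map]
    have hslice0 : PySem.List.slice (x :: xs) (some 0) (some (0 + 8)) = (x :: xs).take 8 := by
      rw [PySem.List.slice_toNat _ le_rfl (by norm_num)]
      simp
    by_cases h8 : 8 ≤ (x :: xs).length
    · have hlen : ((((x :: xs).drop 8).length : Nat) : Int) = ((x :: xs).length : Int) - 8 := by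
        simp only [List.length_drop, List.length_cons] at h8 ⊢
        push_cast
        omega
      have hmap : ((PySem.List.pyRange 0 (((x :: xs).length : Int) - 8) 8).map
            ((fun i => ((PySem.List.slice (x :: xs) (some i) (some (i + 8))).zip kcs).map
                (fun bk => pvXorChr bk.1 bk.2)) ∘ (· + 8)))
          = ((PySem.List.pyRange 0 ((((x :: xs).drop 8).length : Nat) : Int) 8).map
            (fun i => ((PySem.List.slice ((x :: xs).drop 8) (some i) (some (i + 8))).zip kcs).map
                (fun bk => pvXorChr bk.1 bk.2))) := by
        rw [hlen]
        apply List.map_congr_left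
        intro i hi
        obtain ⟨hi0, -, -⟩ := PySem.List.mem_pyRange_of_pos (by norm_num) hi
        simp only [Function.comp]
        congr 1
        rw [PySem.List.slice_toNat (x :: xs) (a := i + 8) (b := i + 8 + 8) (by omega) (by omega),
            PySem.List.slice_toNat ((x :: xs).drop 8) (a := i) (b := i + 8) (by omega) (by omega),
            List.drop_drop]
        have h1 : (i + 8 + 8).toNat - (i + 8).toNat = (i + 8).toNat - i.toNat := by omega
        have h2 : (i + 8).toNat = 8 + i.toNat := by omega
        rw [h1, h2]
      rw [hmap, ih, hslice0]
      conv_rhs => rw [pvChunkRec]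
      simp [pvChunk]
    · have hd : (x :: xs).drop 8 = [] := by
        apply List.drop_eq_nil_of_le; omega
      have hr : PySem.List.pyRange 0 (((x :: xs).length : Int) - 8) 8 = [] := by
        apply pyRange_step8_nil; simp at h8 ⊢; omega
      rw [hr, hslice0]
      simp [pvChunkRec, hd, pvChunk]

-- B-side block lemma
lemma B_block (kcs : List Char) (bl : List Int) :
    ∀ (j : Nat) (i : Int), 0 ≤ i → PySem.Int.mod i 8 = (j : Int) → j + bl.length ≤ 8 →
    ((PySem.List.enumerate bl i).filter
        (fun ib => PySem.Int.mod ib.1 8 < (kcs.length : Int))).map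
      (fun ib => pvXorChr ib.2 (kcs.getD (PySem.Int.mod ib.1 8).toNat ' '))
    = (bl.zip (kcs.drop j)).map (fun bk => pvXorChr bk.1 bk.2) := by
  induction bl with
  | nil => intro j i _ _ _; simp [PySem.List.enumerate]
  | cons b bl' ih =>
    intro j i hi hm hlen
    rw [PySem.Int.mod_eq_emod_of_pos (by norm_num : (0:Int) < 8)] at hm
    simp only [PySem.Int.mod_eq_emod_of_pos (by norm_num : (0:Int) < 8)]
    rw [PySem.List.enumerate_cons]
    by_cases hj : (j : Int) < (kcs.length : Int)
    · have hjn : j < kcs.length := by exact_mod_cast hj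
      rw [List.filter_cons_of_pos (by simp [hm, hj]), List.map_cons]
      rw [List.drop_eq_getElem_cons hjn, List.zip_cons_cons, List.map_cons]
      have hhead : kcs.getD (i % 8).toNat ' ' = kcs[j] := by
        rw [hm]; simp [List.getElem?_eq_getElem hjn]
      rw [hhead]
      cases bl' with
      | nil => simp [PySem.List.enumerate]
      | cons c r =>
        have hm' : PySem.Int.mod (i + 1) 8 = ((j + 1 : Nat) : Int) := by
          rw [PySem.Int.mod_eq_emod_of_pos (by norm_num)]
          simp at hlen
          push_cast
          omega
        have htail := ih (j + 1) (i + 1) (by omega) hm' (by simp at hlen ⊢; omega)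
        simp only [PySem.Int.mod_eq_emod_of_pos (by norm_num : (0:Int) < 8)] at htail
        rw [htail]
    · have hdrop : kcs.drop j = [] := by
        apply List.drop_eq_nil_of_le; omega
      rw [List.filter_cons_of_neg (by simp [hm, hj]), hdrop, List.zip_nil_right, List.map_nil]
      cases bl' with
      | nil => simp [PySem.List.enumerate]
      | cons c r =>
        have hm' : PySem.Int.mod (i + 1) 8 = ((j + 1 : Nat) : Int) := by
          rw [PySem.Int.mod_eq_emod_of_pos (by norm_num)]
          simp at hlen
          push_cast
          omega
        have htail := ih (j + 1) (i + 1) (by omega) hm' (by simp at hlen ⊢; omega)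
        simp only [PySem.Int.mod_eq_emod_of_pos (by norm_num : (0:Int) < 8)] at htail
        rw [htail]
        have : kcs.drop (j + 1) = [] := by apply List.drop_eq_nil_of_le; omega
        rw [this, List.zip_nil_right, List.map_nil]

-- B-side chars = pvChunkRec
lemma B_chunks (kcs : List Char) (hv : List Int) : ∀ (q : Nat),
    ((PySem.List.enumerate hv ((8 * q : Nat) : Int)).filter
        (fun ib => PySem.Int.mod ib.1 8 < (kcs.length : Int))).map
      (fun ib => pvXorChr ib.2 (kcs.getD (PySem.Int.mod ib.1 8).toNat ' '))
    = pvChunkRec kcs hv := by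
  induction hv using pvChunkRec.induct with
  | case1 => intro q; simp [PySem.List.enumerate, pvChunkRec]
  | case2 x xs ih =>
    intro q
    have hmq : PySem.Int.mod ((8 * q : Nat) : Int) 8 = ((0 : Nat) : Int) := by
      rw [PySem.Int.mod_eq_emod_of_pos (by norm_num)]
      push_cast; omega
    conv_lhs => rw [← List.take_append_drop 8 (x :: xs)]
    rw [PySem.List.enumerate_append, List.filter_append, List.map_append]
    rw [B_block kcs _ 0 _ (by positivity) hmq (by simp only [List.length_take]; omega)]
    by_cases h8 : 8 ≤ (x :: xs).length
    · have hlen : (((x :: xs).take 8).length : Int) = 8 := by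
        simp only [List.length_take, List.length_cons] at h8 ⊢
        push_cast
        omega
      have hstart : ((8 * q : Nat) : Int) + (((x :: xs).take 8).length : Int)
          = ((8 * (q + 1) : Nat) : Int) := by rw [hlen]; push_cast; ring
      rw [hstart, ih (q + 1)]
      simp [pvChunkRec, pvChunk]
    · have hd : (x :: xs).drop 8 = [] := by apply List.drop_eq_nil_of_le; omega
      rw [hd]
      simp [PySem.List.enumerate, pvChunkRec, pvChunk, hd]

-- ===== VERDICT (by name: the statement is the Claim_ definition above) =====
theorem xor_block_decrypt_spec : Claim_equal_xor_block_decrypt := by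
  intro hex_text key _ _
  unfold Spec_xor_block_decrypt xor_block_decrypt xor_block_decrypt_alt
  cases h : (PySem.Str.split₀ hex_text).mapM (fun h => PySem.Int.ofStrBase? h 16) with
  | none => rfl
  | some hv =>
    simp only []
    congr 1
    rw [PySem.List.foldl_append_eq_flatMap
        (fun i => [String.ofList (((PySem.List.slice hv (some i) (some (i + 8))).zip key.toList).map
          (fun bk => pvXorChr bk.1 bk.2))]) _ []]
    rw [List.nil_append, pv_flatMap_single
      (fun i => String.ofList (((PySem.List.slice hv (some i) (some (i + 8))).zip key.toList).map
        (fun bk => pvXorChr bk.1 bk.2)))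
      (PySem.List.pyRange 0 (hv.length : Int) 8)]
    have hA : (PySem.Str.join "" ((PySem.List.pyRange 0 (hv.length : Int) 8).map
        (fun i => String.ofList (((PySem.List.slice hv (some i) (some (i + 8))).zip key.toList).map
          (fun bk => pvXorChr bk.1 bk.2))))).toList = pvChunkRec key.toList hv := by
      rw [PySem.Str.toList_join]
      have : (String.toList "") = ([] : List Char) := rfl
      rw [this, chars_join_nil, List.map_map]
      rw [show (String.toList ∘ fun i => String.ofList
            (((PySem.List.slice hv (some i) (some (i + 8))).zip key.toList).map
              (fun bk => pvXorChr bk.1 bk.2)))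
          = (fun i => ((PySem.List.slice hv (some i) (some (i + 8))).zip key.toList).map
              (fun bk => pvXorChr bk.1 bk.2)) from by
        funext i; simp]
      exact A_chunks key.toList hv
    have hB : ((PySem.List.enumerate hv).filter
          (fun ib => PySem.Int.mod ib.1 8 < (key.length : Int))).map
        (fun ib => pvXorChr ib.2 (key.toList.getD (PySem.Int.mod ib.1 8).toNat ' '))
        = pvChunkRec key.toList hv := by
      have := B_chunks key.toList hv 0
      simpa using this
    rw [hB]
    have : PySem.Str.join "" ((PySem.List.pyRange 0 (hv.length : Int) 8).map
        (fun i => String.ofList (((PySem.List.slice hv (some i) (some (i + 8))).zip key.toList).map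
          (fun bk => pvXorChr bk.1 bk.2)))) = String.ofList (pvChunkRec key.toList hv) := by
      have h2 := congrArg String.ofList hA
      rwa [String.ofList_toList] at h2
    rw [this]
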